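-- pv_equiv track=rewrite | github.com/banpojihyo/saju-korean-lecture-transcriber | generate_ai_summaries_api.py | terms_in_text
-- ===== SOURCE A (Python) =====
-- def terms_in_text(text: str, terms: list[str], limit: int = 60) -> list[str]:
--     hits: list[str] = []
--     for term in terms:
--         if term in text:
--             hits.append(term)
--             if len(hits) >= limit:
--                 break
--     return hits
-- ===== SOURCE B (Python) =====
-- def terms_in_text(text: str, terms: list[str], limit: int = 60) -> list[str]:
--     n = len(text)
--     # index every window of text once, keyed by length, so each term check is a hash lookup
--     windows = {}
--     for L in {len(t) for t in terms if len(t) <= n}: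
--         windows[L] = {text[i:i + L] for i in range(n - L + 1)}
--     hits: list[str] = []
--     for term in terms:
--         if len(hits) >= limit:
--             break
--         if len(term) <= n and term in windows[len(term)]:
--             hits.append(term)
--     return hits
-- ===== Notes on version B (the rewrite author's own statement) =====
-- stated objective: faster
-- what changed: B indexes all windows of text once in per-length hash sets (built from the distinct term lengths), so each term is checked by one O(len(term)) hash lookup instead of scanning text per term; B also checks the limit before collecting a hit.
-- intended difference: When limit <= 0 and some term occurs in text, A still returns a one-element list [first matching term] because it appends before checking the limit, while B returns [], which is the intended meaning of a non-positive limit. — e.g. on terms_in_text("ab", ["a"], 0): A returns ["a"], B returns []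
import Mathlib
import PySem

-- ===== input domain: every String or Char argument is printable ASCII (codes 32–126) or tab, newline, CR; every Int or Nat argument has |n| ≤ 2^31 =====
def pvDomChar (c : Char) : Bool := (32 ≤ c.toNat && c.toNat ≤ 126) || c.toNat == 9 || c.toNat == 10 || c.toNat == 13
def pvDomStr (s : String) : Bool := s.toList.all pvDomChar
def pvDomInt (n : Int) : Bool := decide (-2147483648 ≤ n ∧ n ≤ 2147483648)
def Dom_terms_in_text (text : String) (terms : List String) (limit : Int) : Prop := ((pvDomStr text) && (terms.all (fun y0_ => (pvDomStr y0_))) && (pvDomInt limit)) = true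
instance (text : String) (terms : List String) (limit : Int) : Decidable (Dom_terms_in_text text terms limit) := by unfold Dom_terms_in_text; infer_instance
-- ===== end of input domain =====

-- B replaces A's per-term substring scan by a once-built hash index of all windows of text
-- keyed by term length (objective: faster, asymptotically fewer character comparisons).

-- ===== PORT A =====
-- the 'for term in terms' loop with append and break
def pvGoA (text : String) (limit : Int) (hits : List String) : List String → List String
  | [] => hits
  | t :: rest =>
    if PySem.Str.isIn t text then
      if limit ≤ ((hits ++ [t]).length : Int) then hits ++ [t]
      else pvGoA text limit (hits ++ [t]) rest
    else pvGoA text limit hits rest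

def terms_in_text (text : String) (terms : List String) (limit : Int) : List String :=
  pvGoA text limit [] terms

-- ===== PORT B =====
-- {text[i:i+L] for i in range(n - L + 1)}  (text[i:i+L] with Nat bounds is (drop i).take L: PySem.List.slice_natCast_add)
def pvWin (s : List Char) (L : Nat) : PySem.Set (List Char) :=
  PySem.Set.ofList ((List.range (s.length - L + 1)).map (fun i => (s.drop i).take L))

-- windows = {L: {...} for L in {len(t) for t in terms if len(t) <= n}}
def pvWindows (text : String) (terms : List String) : PySem.Dict Nat (PySem.Set (List Char)) :=
  (PySem.Set.ofList ((terms.filter (fun t => t.toList.length ≤ text.toList.length)).map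
      (fun t => t.toList.length))).foldl
    (fun d L => d.insert L (pvWin text.toList L)) PySem.Dict.empty

-- the collecting loop: limit checked BEFORE appending
def pvGoB (text : String) (windows : PySem.Dict Nat (PySem.Set (List Char))) (limit : Int)
    (hits : List String) : List String → List String
  | [] => hits
  | t :: rest =>
    if limit ≤ (hits.length : Int) then hits
    else if decide (t.toList.length ≤ text.toList.length)
            && PySem.Set.contains (windows.getD t.toList.length PySem.Set.empty) t.toList then
      pvGoB text windows limit (hits ++ [t]) rest
    else pvGoB text windows limit hits rest

def terms_in_text_alt (text : String) (terms : List String) (limit : Int) : List String :=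
  pvGoB text (pvWindows text terms) limit [] terms

-- ===== PRECONDITION & SPEC =====
-- When limit ≤ 0 and some term occurs in text, A returns [first matching term] (it appends
-- before checking the limit), while B returns [], the intended meaning of a non-positive limit.
def D_terms_in_text (text : String) (terms : List String) (limit : Int) : Prop :=
  limit ≤ 0 ∧ terms.any (fun t => PySem.Str.isIn t text) = true
instance (text : String) (terms : List String) (limit : Int) : Decidable (D_terms_in_text text terms limit) := by unfold D_terms_in_text; infer_instance

def Spec_terms_in_text (text : String) (terms : List String) (limit : Int) (out : List String) : Prop := ¬ D_terms_in_text text terms limit → out = terms_in_text_alt text terms limit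
instance (text : String) (terms : List String) (limit : Int) (out : List String) : Decidable (Spec_terms_in_text text terms limit out) := by unfold Spec_terms_in_text; infer_instance

def pvDiffWitness_terms_in_text : String × List String × Int := ("ab", ["a"], 0)
def pvDiffWitnessOut_terms_in_text : (List String) × (List String) := (["a"], [])

-- ===== CLAIM (what is proved, stated in full; the proofs are below) =====
def Claim_unchanged_terms_in_text : Prop := ∀ (text : String) (terms : List String) (limit : Int), Dom_terms_in_text text terms limit → Spec_terms_in_text text terms limit (terms_in_text text terms limit)
def Claim_changed_terms_in_text : Prop := Dom_terms_in_text (pvDiffWitness_terms_in_text.1) (pvDiffWitness_terms_in_text.2.1) (pvDiffWitness_terms_in_text.2.2) ∧ D_terms_in_text (pvDiffWitness_terms_in_text.1) (pvDiffWitness_terms_in_text.2.1) (pvDiffWitness_terms_in_text.2.2) ∧ terms_in_text (pvDiffWitness_terms_in_text.1) (pvDiffWitness_terms_in_text.2.1) (pvDiffWitness_terms_in_text.2.2) = pvDiffWitnessOut_terms_in_text.1 ∧ terms_in_text_alt (pvDiffWitness_terms_in_text.1) (pvDiffWitness_terms_in_text.2.1) (pvDiffWitness_terms_in_text.2.2)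 = pvDiffWitnessOut_terms_in_text.2 ∧ pvDiffWitnessOut_terms_in_text.1 ≠ pvDiffWitnessOut_terms_in_text.2
def Claim_exact_terms_in_text : Prop := ∀ (text : String) (terms : List String) (limit : Int), Dom_terms_in_text text terms limit → D_terms_in_text text terms limit → terms_in_text text terms limit ≠ terms_in_text_alt text terms limit

-- ===== LEMMAS AND PROOFS =====

-- the window-index fold never disturbs an already-correct binding …
theorem pvFoldl_getD_preserved (s : List Char) (Ls : List Nat) (d : PySem.Dict Nat (PySem.Set (List Char))) (L : Nat)
    (h : d.getD L PySem.Set.empty = pvWin s L) :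
    (Ls.foldl (fun d L' => d.insert L' (pvWin s L')) d).getD L PySem.Set.empty = pvWin s L := by
  induction Ls generalizing d with
  | nil => simpa using h
  | cons L' Ls ih =>
    simp only [List.foldl_cons]
    apply ih
    rw [PySem.Dict.getD_insert]
    split_ifs with he
    · rw [he]
    · exact h

-- … and installs pvWin s L at every length L it visits
theorem pvFoldl_getD_of_mem (s : List Char) (Ls : List Nat) (d : PySem.Dict Nat (PySem.Set (List Char))) (L : Nat)
    (h : L ∈ Ls) :
    (Ls.foldl (fun d L' => d.insert L' (pvWin s L')) d).getD L PySem.Set.empty = pvWin s L := by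
  induction Ls generalizing d with
  | nil => cases h
  | cons L' Ls ih =>
    simp only [List.foldl_cons]
    rcases List.mem_cons.mp h with he | hm
    · by_cases hL : L ∈ Ls
      · exact ih _ hL
      · apply pvFoldl_getD_preserved
        rw [he, PySem.Dict.getD_insert_self]
    · exact ih _ hm

-- membership in the length-L window set is exactly Python's 'sub in text'
theorem pvWin_contains_iff (s t : List Char) :
    (decide (t.length ≤ s.length) && PySem.Set.contains (pvWin s t.length) t) = PySem.Chars.isIn t s := by
  rw [Bool.eq_iff_iff]
  rw [← PySem.Chars.exists_prefix_drop_iff_isIn]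
  simp only [Bool.and_eq_true, decide_eq_true_eq, PySem.Set.contains_iff, pvWin,
    PySem.Set.mem_ofList, List.mem_map, List.mem_range]
  constructor
  · rintro ⟨-, i, -, ht⟩
    exact ⟨i, ht ▸ List.take_prefix _ _⟩
  · rintro ⟨j, hp⟩
    have hlen : t.length ≤ (s.drop j).length := hp.length_le
    rw [List.length_drop] at hlen
    by_cases hj : j ≤ s.length
    · refine ⟨by omega, j, by omega, ?_⟩
      exact (List.prefix_iff_eq_take.mp hp).symm
    · have : s.drop j = [] := List.drop_eq_nil_of_le (by omega)
      rw [this, List.prefix_nil] at hp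
      subst hp
      exact ⟨by simp, 0, by simp, by simp⟩

-- B's loop condition computes A's substring test, for any term of the original list
theorem pvCond_eq (text : String) (terms : List String) (t : String) (ht : t ∈ terms) :
    (decide (t.toList.length ≤ text.toList.length)
      && PySem.Set.contains ((pvWindows text terms).getD t.toList.length PySem.Set.empty) t.toList)
    = PySem.Str.isIn t text := by
  by_cases hle : t.toList.length ≤ text.toList.length
  · have hkey : t.toList.length ∈
        (PySem.Set.ofList ((terms.filter (fun u => u.toList.length ≤ text.toList.length)).map
          (fun u => u.toList.length)) : List Nat) := by
      rw [PySem.Set.mem_ofList]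
      exact List.mem_map.mpr ⟨t, List.mem_filter.mpr ⟨ht, by simpa using hle⟩, rfl⟩
    unfold pvWindows
    rw [pvFoldl_getD_of_mem _ _ _ _ hkey, pvWin_contains_iff]
    simp
  · have h1 : decide (t.toList.length ≤ text.toList.length) = false := by simpa using hle
    rw [h1, Bool.false_and]
    have := pvWin_contains_iff text.toList t.toList
    rw [h1, Bool.false_and] at this
    simp [this]

-- once the limit is reached B's loop stops at once
theorem pvGoB_stop (text : String) (w : PySem.Dict Nat (PySem.Set (List Char))) (limit : Int)
    (hits rest : List String) (h : limit ≤ (hits.length : Int)) :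
    pvGoB text w limit hits rest = hits := by
  cases rest with
  | nil => rfl
  | cons t r => simp [pvGoB, h]

-- the two loops agree while the limit has not been reached
theorem pvLoop_eq (text : String) (terms : List String) (limit : Int) :
    ∀ (rest hits : List String), (∀ t ∈ rest, t ∈ terms) → (hits.length : Int) < limit →
    pvGoA text limit hits rest = pvGoB text (pvWindows text terms) limit hits rest := by
  intro rest
  induction rest with
  | nil => intro hits _ _; rfl
  | cons t r ih =>
    intro hits hsub hlt
    have hcond := pvCond_eq text terms t (hsub t (List.mem_cons_self))
    have hlt' : ¬ limit ≤ (hits.length : Int) := Int.not_le.mpr hlt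
    by_cases hin : PySem.Str.isIn t text = true
    · by_cases hstop : limit ≤ (((hits ++ [t]).length : Nat) : Int)
      · simp only [pvGoA, pvGoB, hlt', if_false, hcond, hin, if_true, if_pos hstop]
        exact (pvGoB_stop text _ limit (hits ++ [t]) r hstop).symm
      · simp only [pvGoA, pvGoB, hlt', if_false, hcond, hin, if_true, if_neg hstop]
        exact ih (hits ++ [t]) (fun u hu => hsub u (List.mem_cons_of_mem _ hu)) (by omega)
    · rw [Bool.not_eq_true] at hin
      simp only [pvGoA, pvGoB, hlt', if_false, hcond, hin]
      exact ih hits (fun u hu => hsub u (List.mem_cons_of_mem _ hu)) hlt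

-- with no matching term, A's loop returns its accumulator unchanged
theorem pvGoA_no_match (text : String) (limit : Int) :
    ∀ (rest hits : List String), (∀ t ∈ rest, PySem.Str.isIn t text = false) →
    pvGoA text limit hits rest = hits := by
  intro rest
  induction rest with
  | nil => intro hits _; rfl
  | cons t r ih =>
    intro hits h
    simp only [pvGoA, h t List.mem_cons_self, Bool.false_eq_true, if_false]
    exact ih hits (fun u hu => h u (List.mem_cons_of_mem _ hu))

-- with a non-positive limit and a matching term, A's loop returns a non-empty list
theorem pvGoA_ne_nil (text : String) (limit : Int) (hlim : limit ≤ 0) :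
    ∀ (rest hits : List String), (∃ t ∈ rest, PySem.Str.isIn t text = true) →
    pvGoA text limit hits rest ≠ [] := by
  intro rest
  induction rest with
  | nil => rintro hits ⟨t, ht, -⟩; cases ht
  | cons t r ih =>
    rintro hits ⟨u, hu, hin⟩
    by_cases hit : PySem.Str.isIn t text = true
    · have hstop : limit ≤ (((hits ++ [t]).length : Nat) : Int) := by
        simp only [List.length_append, List.length_cons, List.length_nil]
        omega
      simp only [pvGoA, hit, if_true, if_pos hstop]
      simp
    · rw [Bool.not_eq_true] at hit
      simp only [pvGoA, hit, Bool.false_eq_true, if_false]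
      rcases List.mem_cons.mp hu with rfl | hur
      · rw [hin] at hit; cases hit
      · exact ih hits ⟨u, hur, hin⟩

-- ===== VERDICT (by name: the statement is the Claim_ definition above) =====
theorem terms_in_text_spec : Claim_unchanged_terms_in_text := by
  intro text terms limit _ hnd
  unfold terms_in_text terms_in_text_alt
  by_cases hl : (0 : Int) < limit
  · exact pvLoop_eq text terms limit terms [] (fun _ h => h) (by simpa using hl)
  · have hany : terms.any (fun t => PySem.Str.isIn t text) = false := by
      by_contra h
      exact hnd ⟨by omega, by simpa using h⟩
    rw [List.any_eq_false] at hany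
    rw [pvGoA_no_match text limit terms [] (fun t ht => by simpa using hany t ht),
        pvGoB_stop text _ limit [] terms (by simpa using hl)]

theorem terms_in_text_changed : Claim_changed_terms_in_text := by
  unfold Claim_changed_terms_in_text; decide

theorem terms_in_text_tight : Claim_exact_terms_in_text := by
  intro text terms limit _ hD
  rcases hD with ⟨hlim, hany⟩
  rw [List.any_eq_true] at hany
  unfold terms_in_text terms_in_text_alt
  rw [pvGoB_stop text _ limit [] terms (by simpa using hlim)]
  exact pvGoA_ne_nil text limit hlim terms [] (by simpa using hany)
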